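-- pv_equiv track=rewrite | github.com/Kevin-Xue01/BME-411-Final-Project | 411_brain.py | add_radius_around_points
-- ===== SOURCE A (Python) =====
-- def add_radius_around_points(points, radius, shape):
--     expanded_points = set()
--     for z, y, x in points:
--         for dz in range(-radius, radius + 1):
--             for dy in range(-radius, radius + 1):
--                 for dx in range(-radius, radius + 1):
--                     if dz**2 + dy**2 + dx**2 <= radius**2:  # Within the sphere
--                         nz, ny, nx = z + dz, y + dy, x + dx
--                         if 0 <= nz < shape[0] and 0 <= ny < shape[1] and 0 <= nx < shape[2]:
--                             expanded_points.add((nz, ny, nx))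
--     return expanded_points
-- ===== SOURCE B (Python) =====
-- def add_radius_around_points(points, radius, shape):
--     # Enumerate exactly the lattice points of the ball via per-row extents
--     # (integer square roots), instead of scanning the whole cube and filtering.
--     def isqrt(n):
--         r = 0
--         while (r + 1) * (r + 1) <= n:
--             r += 1
--         return r
--
--     result = set()
--     for z, y, x in points:
--         for dz in range(-radius, radius + 1):
--             rem_z = radius * radius - dz * dz
--             ry = isqrt(rem_z)
--             for dy in range(-ry, ry + 1):
--                 rx = isqrt(rem_z - dy * dy)
--                 for dx in range(-rx, rx + 1):
--                     nz, ny, nx = z + dz, y + dy, x + dx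
--                     if 0 <= nz < shape[0] and 0 <= ny < shape[1] and 0 <= nx < shape[2]:
--                         result.add((nz, ny, nx))
--     return result
-- ===== Notes on version B (the rewrite author's own statement) =====
-- stated objective: alternative
-- what changed: B enumerates exactly the lattice points of each ball by computing per-row extents with a hand-written integer square root (dy ranges over [-isqrt(r^2-dz^2), ..], dx over the analogous interval), so the sphere-membership test disappears entirely, instead of A's scan of the whole (2r+1)^3 cube filtered by dz^2+dy^2+dx^2 <= r^2.
import Mathlib
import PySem

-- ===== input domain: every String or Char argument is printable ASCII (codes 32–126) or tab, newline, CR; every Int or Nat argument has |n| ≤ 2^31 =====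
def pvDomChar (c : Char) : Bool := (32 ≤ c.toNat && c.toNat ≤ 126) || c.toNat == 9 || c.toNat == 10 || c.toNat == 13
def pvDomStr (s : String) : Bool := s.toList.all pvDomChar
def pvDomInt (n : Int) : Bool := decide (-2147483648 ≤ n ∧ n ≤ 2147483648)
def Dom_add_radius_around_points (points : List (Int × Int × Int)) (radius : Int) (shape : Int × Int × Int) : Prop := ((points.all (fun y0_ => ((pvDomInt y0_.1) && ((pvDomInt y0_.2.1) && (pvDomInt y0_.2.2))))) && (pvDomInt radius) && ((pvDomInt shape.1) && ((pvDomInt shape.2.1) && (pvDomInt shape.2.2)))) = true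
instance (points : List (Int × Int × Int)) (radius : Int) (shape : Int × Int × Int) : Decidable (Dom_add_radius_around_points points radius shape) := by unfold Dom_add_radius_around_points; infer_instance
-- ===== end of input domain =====

-- B enumerates exactly the ball's lattice points via per-row extents computed with an
-- integer square root, instead of A's filtered scan of the whole cube; same resulting set.

-- ===== PORT A =====
def add_radius_around_points (points : List (Int × Int × Int)) (radius : Int) (shape : Int × Int × Int) : List (Int × Int × Int) :=
  points.foldl (fun s p =>
    (PySem.List.pyRange (-radius) (radius + 1) 1).foldl (fun s dz =>
      (PySem.List.pyRange (-radius) (radius + 1) 1).foldl (fun s dy =>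
        (PySem.List.pyRange (-radius) (radius + 1) 1).foldl (fun s dx =>
          if dz ^ 2 + dy ^ 2 + dx ^ 2 ≤ radius ^ 2 then
            if 0 ≤ p.1 + dz ∧ p.1 + dz < shape.1 ∧ 0 ≤ p.2.1 + dy ∧ p.2.1 + dy < shape.2.1 ∧
               0 ≤ p.2.2 + dx ∧ p.2.2 + dx < shape.2.2 then
              PySem.Set.add s (p.1 + dz, p.2.1 + dy, p.2.2 + dx)
            else s
          else s) s) s) s) PySem.Set.empty

-- ===== PORT B =====
-- Source B's hand-written 'while (r+1)*(r+1) <= n: r += 1' loop, started at r = 0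
def pvIsqrtGo (n r : Int) : Int :=
  if (r + 1) * (r + 1) ≤ n then pvIsqrtGo n (r + 1) else r
termination_by (n - r).toNat
decreasing_by
  rename_i h
  have h1 : r + 1 ≤ n := by
    by_cases h0 : r + 1 ≤ 1
    · nlinarith [mul_self_nonneg (r + 1)]
    · nlinarith
  omega

def pvIsqrt (n : Int) : Int := pvIsqrtGo n 0

def add_radius_around_points_alt (points : List (Int × Int × Int)) (radius : Int) (shape : Int × Int × Int) : List (Int × Int × Int) :=
  points.foldl (fun s p =>
    (PySem.List.pyRange (-radius) (radius + 1) 1).foldl (fun s dz =>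
      (PySem.List.pyRange (-(pvIsqrt (radius * radius - dz * dz)))
          (pvIsqrt (radius * radius - dz * dz) + 1) 1).foldl (fun s dy =>
        (PySem.List.pyRange (-(pvIsqrt (radius * radius - dz * dz - dy * dy)))
            (pvIsqrt (radius * radius - dz * dz - dy * dy) + 1) 1).foldl (fun s dx =>
          if 0 ≤ p.1 + dz ∧ p.1 + dz < shape.1 ∧ 0 ≤ p.2.1 + dy ∧ p.2.1 + dy < shape.2.1 ∧
             0 ≤ p.2.2 + dx ∧ p.2.2 + dx < shape.2.2 then
            PySem.Set.add s (p.1 + dz, p.2.1 + dy, p.2.2 + dx)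
          else s) s) s) s) PySem.Set.empty

-- ===== PRECONDITION & SPEC =====
def Spec_add_radius_around_points (points : List (Int × Int × Int)) (radius : Int) (shape : Int × Int × Int) (out : List (Int × Int × Int)) : Prop := out = add_radius_around_points_alt points radius shape
instance (points : List (Int × Int × Int)) (radius : Int) (shape : Int × Int × Int) (out : List (Int × Int × Int)) : Decidable (Spec_add_radius_around_points points radius shape out) := by unfold Spec_add_radius_around_points; infer_instance

-- ===== CLAIM (what is proved, stated in full; the proofs are below) =====
def Claim_equal_add_radius_around_points : Prop := ∀ (points : List (Int × Int × Int)) (radius : Int) (shape : Int × Int × Int), Dom_add_radius_around_points points radius shape → Spec_add_radius_around_points points radius shape (add_radius_around_points points radius shape)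


-- ===== LEMMAS AND PROOFS =====

theorem pvIsqrtGo_spec (n r : Int) : 0 ≤ r → r * r ≤ n →
    r ≤ pvIsqrtGo n r ∧ pvIsqrtGo n r * pvIsqrtGo n r ≤ n ∧
      n < (pvIsqrtGo n r + 1) * (pvIsqrtGo n r + 1) := by
  fun_induction pvIsqrtGo n r with
  | case1 r hg ih =>
    intro hr _
    obtain ⟨i1, i2, i3⟩ := ih (by omega) hg
    exact ⟨by omega, i2, i3⟩
  | case2 r hg =>
    intro hr h
    exact ⟨le_rfl, h, by omega⟩

theorem pvIsqrt_spec (n : Int) (h : 0 ≤ n) :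
    0 ≤ pvIsqrt n ∧ pvIsqrt n * pvIsqrt n ≤ n ∧ n < (pvIsqrt n + 1) * (pvIsqrt n + 1) := by
  obtain ⟨a, b, c⟩ := pvIsqrtGo_spec n 0 le_rfl (by simpa using h)
  exact ⟨a, b, c⟩

-- d² ≤ n iff d lies in the symmetric interval [-isqrt n, isqrt n]
theorem pv_sq_le_iff (n d : Int) (h : 0 ≤ n) :
    d * d ≤ n ↔ (-(pvIsqrt n) ≤ d ∧ d ≤ pvIsqrt n) := by
  obtain ⟨h0, h1, h2⟩ := pvIsqrt_spec n h
  constructor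
  · intro hd
    constructor
    · by_contra hc
      push Not at hc
      nlinarith
    · by_contra hc
      push Not at hc
      nlinarith
  · intro ⟨ha, hb⟩
    nlinarith

-- a fold that skips every element is the identity
theorem pv_foldl_if_skip {γ : Type} (l : List Int) (c : Int → Prop) [DecidablePred c]
    (f : γ → Int → γ) (s : γ) (h : ∀ x ∈ l, ¬ c x) :
    l.foldl (fun s x => if c x then f s x else s) s = s := by
  induction l generalizing s with
  | nil => rfl
  | cons a t ih =>
    simp only [List.foldl_cons, if_neg (h a (by simp))]
    exact ih s (fun x hx => h x (by simp [hx]))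

-- folding a guarded body over a full integer range = folding the bare body over the
-- sub-range on which the guard holds, when the guard is the interval [lo, hi]
theorem pv_foldl_range_if {γ : Type} (a b lo hi : Int) (c : Int → Prop) [DecidablePred c]
    (f : γ → Int → γ) (s : γ)
    (hc : ∀ x, c x ↔ (lo ≤ x ∧ x ≤ hi))
    (ha : a ≤ lo) (hb : hi + 1 ≤ b) (hlh : lo ≤ hi + 1) :
    (PySem.List.pyRange a b 1).foldl (fun s x => if c x then f s x else s) s
      = (PySem.List.pyRange lo (hi + 1) 1).foldl f s := by
  rw [PySem.List.pyRange_one_append a lo b ha (by omega),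
      PySem.List.pyRange_one_append lo (hi + 1) b hlh hb,
      List.foldl_append, List.foldl_append]
  rw [pv_foldl_if_skip (PySem.List.pyRange a lo 1) c f s (fun x hx => by
        rw [PySem.List.mem_pyRange_one] at hx
        rw [hc]; omega)]
  rw [pv_foldl_if_skip (PySem.List.pyRange (hi + 1) b 1) c f
        ((PySem.List.pyRange lo (hi + 1) 1).foldl (fun s x => if c x then f s x else s) s)
        (fun x hx => by
          rw [PySem.List.mem_pyRange_one] at hx
          rw [hc]; omega)]
  exact PySem.List.foldl_congr_mem _ _ _ _ (fun s x hx => by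
    rw [PySem.List.mem_pyRange_one] at hx
    rw [if_pos ((hc x).2 ⟨hx.1, by omega⟩)])

-- ===== VERDICT (by name: the statement is the Claim_ definition above) =====
theorem add_radius_around_points_spec : Claim_equal_add_radius_around_points := by
  intro points radius shape _
  unfold Spec_add_radius_around_points add_radius_around_points add_radius_around_points_alt
  refine PySem.List.foldl_congr_mem _ _ _ _ (fun s p _ => ?_)
  refine PySem.List.foldl_congr_mem _ _ _ _ (fun s dz hdz => ?_)
  rw [PySem.List.mem_pyRange_one] at hdz
  have hrad : 0 ≤ radius := by omega
  have hremz0 : 0 ≤ radius * radius - dz * dz := by nlinarith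
  obtain ⟨hry0, hry1, hry2⟩ := pvIsqrt_spec (radius * radius - dz * dz) hremz0
  have hryr : pvIsqrt (radius * radius - dz * dz) ≤ radius := by nlinarith
  have body : ∀ (s : List (Int × Int × Int)) (dy : Int),
      (PySem.List.pyRange (-radius) (radius + 1) 1).foldl (fun s dx =>
        if dz ^ 2 + dy ^ 2 + dx ^ 2 ≤ radius ^ 2 then
          if 0 ≤ p.1 + dz ∧ p.1 + dz < shape.1 ∧ 0 ≤ p.2.1 + dy ∧ p.2.1 + dy < shape.2.1 ∧
             0 ≤ p.2.2 + dx ∧ p.2.2 + dx < shape.2.2 then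
            PySem.Set.add s (p.1 + dz, p.2.1 + dy, p.2.2 + dx)
          else s
        else s) s
      = if dy * dy ≤ radius * radius - dz * dz then
          (PySem.List.pyRange (-(pvIsqrt (radius * radius - dz * dz - dy * dy)))
              (pvIsqrt (radius * radius - dz * dz - dy * dy) + 1) 1).foldl
            (fun s dx =>
              if 0 ≤ p.1 + dz ∧ p.1 + dz < shape.1 ∧ 0 ≤ p.2.1 + dy ∧ p.2.1 + dy < shape.2.1 ∧
                 0 ≤ p.2.2 + dx ∧ p.2.2 + dx < shape.2.2 then
                PySem.Set.add s (p.1 + dz, p.2.1 + dy, p.2.2 + dx)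
              else s) s
        else s := by
    intro s dy
    by_cases hdy : dy * dy ≤ radius * radius - dz * dz
    · rw [if_pos hdy]
      have hremy0 : 0 ≤ radius * radius - dz * dz - dy * dy := by omega
      obtain ⟨hrx0, hrx1, hrx2⟩ := pvIsqrt_spec (radius * radius - dz * dz - dy * dy) hremy0
      have hrxr : pvIsqrt (radius * radius - dz * dz - dy * dy) ≤ radius := by nlinarith
      exact pv_foldl_range_if (-radius) (radius + 1)
        (-(pvIsqrt (radius * radius - dz * dz - dy * dy)))
        (pvIsqrt (radius * radius - dz * dz - dy * dy))
        (fun dx => dz ^ 2 + dy ^ 2 + dx ^ 2 ≤ radius ^ 2)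
        (fun s dx =>
          if 0 ≤ p.1 + dz ∧ p.1 + dz < shape.1 ∧ 0 ≤ p.2.1 + dy ∧ p.2.1 + dy < shape.2.1 ∧
             0 ≤ p.2.2 + dx ∧ p.2.2 + dx < shape.2.2 then
            PySem.Set.add s (p.1 + dz, p.2.1 + dy, p.2.2 + dx)
          else s) s
        (fun dx => by
          show (dz ^ 2 + dy ^ 2 + dx ^ 2 ≤ radius ^ 2) ↔ _
          have h1 : (dz ^ 2 + dy ^ 2 + dx ^ 2 ≤ radius ^ 2)
              ↔ dx * dx ≤ radius * radius - dz * dz - dy * dy := by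
            constructor <;> intro hh <;> nlinarith
          rw [h1]
          exact pv_sq_le_iff _ _ hremy0)
        (by omega) (by omega) (by omega)
    · rw [if_neg hdy]
      refine pv_foldl_if_skip _ (fun dx => dz ^ 2 + dy ^ 2 + dx ^ 2 ≤ radius ^ 2) _ s
        (fun dx _ => ?_)
      show ¬ (dz ^ 2 + dy ^ 2 + dx ^ 2 ≤ radius ^ 2)
      intro hh; nlinarith
  rw [PySem.List.foldl_congr_mem _ _ _ _ (fun s dy _ => body s dy)]
  exact pv_foldl_range_if (-radius) (radius + 1)
    (-(pvIsqrt (radius * radius - dz * dz))) (pvIsqrt (radius * radius - dz * dz))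
    (fun dy => dy * dy ≤ radius * radius - dz * dz) _ s
    (fun dy => pv_sq_le_iff _ dy hremz0) (by omega) (by omega) (by omega)
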